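-- pv_equiv track=rewrite | github.com/ranagull/e-book-analysis-and-representation | e-book-analysis-and-representation.py | Delete_Punctuation
-- ===== SOURCE A (Python) =====
-- def Delete_Punctuation(allwords):
--     Filtered_Words = []
--     words = []
--     Punctuation ='!"#$%&()*, -./:;<=>?@[\]^_`{|}~0123456789'+"'"
--
--     '''Since I think there may be punctuation marks in some words,
--     I look for the symbols as strings between words. If there is a word in it,
--     it replaces it with a space and then adds it to the new list.'''
--
--     for word in allwords:
--         for punc in Punctuation:
--             if punc in word:
--                 word = word.replace(punc," ").strip()
--         words =  word.split()
--         if (len(word) > 0):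
--             Filtered_Words += words
--     return Filtered_Words
-- ===== SOURCE B (Python) =====
-- def Delete_Punctuation(allwords):
--     Punctuation ='!"#$%&()*, -./:;<=>?@[\]^_`{|}~0123456789'+"'"
--     Filtered_Words = []
--     for word in allwords:
--         token = ""
--         for ch in word:
--             if ch in Punctuation or ch.isspace():
--                 if token:
--                     Filtered_Words.append(token)
--                 token = ""
--             else:
--                 token += ch
--         if token:
--             Filtered_Words.append(token)
--     return Filtered_Words
-- ===== Notes on version B (the rewrite author's own statement) =====
-- stated objective: faster
-- what changed: Replaced A's per-word loop over all 43 punctuation characters (a substring test plus a full replace-and-strip pass for each) followed by split() with a single left-to-right character scan per word that flushes a token buffer at each punctuation or whitespace character.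
import Mathlib
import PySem

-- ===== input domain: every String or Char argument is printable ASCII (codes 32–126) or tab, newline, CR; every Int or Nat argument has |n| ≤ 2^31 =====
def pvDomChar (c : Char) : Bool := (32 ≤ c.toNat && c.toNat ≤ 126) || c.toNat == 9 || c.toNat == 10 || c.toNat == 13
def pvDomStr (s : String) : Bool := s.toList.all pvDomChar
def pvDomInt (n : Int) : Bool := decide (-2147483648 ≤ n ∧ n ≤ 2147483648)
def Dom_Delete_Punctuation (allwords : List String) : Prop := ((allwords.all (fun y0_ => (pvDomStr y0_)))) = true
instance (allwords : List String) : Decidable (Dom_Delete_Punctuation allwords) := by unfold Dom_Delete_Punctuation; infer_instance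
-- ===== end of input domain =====

-- B replaces A's repeated replace-and-strip passes (one per punctuation character) by a single tokenizing character scan per word; same word list.

-- ===== PORT A =====
-- the Punctuation constant of the Python source (backslash and space included, "'" appended)
def pvPunct : String := "!\"#$%&()*, -./:;<=>?@[\\]^_`{|}~0123456789'"

def Delete_Punctuation (allwords : List String) : List String :=
  allwords.foldl (fun acc word =>
    let word := pvPunct.toList.foldl (fun w punc =>
      if PySem.Str.isIn (String.ofList [punc]) w then
        PySem.Str.strip (PySem.Str.replace w (String.ofList [punc]) " ")
      else w) word
    let words := PySem.Str.split₀ word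
    if PySem.Str.len word > 0 then acc ++ words else acc) []

-- ===== PORT B =====
-- Source B's delimiter test: 'ch in Punctuation or ch.isspace()'
def pvDelim (c : Char) : Bool := pvPunct.toList.contains c || PySem.Chars.isspace c

-- Source B's inner loop: scan the word left to right with a token buffer, flushing at delimiters
def pvScanB : List Char → List Char → List String
  | [], buf => if buf.isEmpty then [] else [String.ofList buf]
  | c :: rest, buf =>
      if pvDelim c then
        (if buf.isEmpty then pvScanB rest [] else String.ofList buf :: pvScanB rest [])
      else pvScanB rest (buf ++ [c])

def Delete_Punctuation_alt (allwords : List String) : List String :=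
  allwords.foldl (fun acc word => acc ++ pvScanB word.toList []) []

-- ===== PRECONDITION & SPEC =====
def Spec_Delete_Punctuation (allwords : List String) (out : List String) : Prop := out = Delete_Punctuation_alt allwords
instance (allwords : List String) (out : List String) : Decidable (Spec_Delete_Punctuation allwords out) := by unfold Spec_Delete_Punctuation; infer_instance

-- ===== CLAIM (what is proved, stated in full; the proofs are below) =====
def Claim_equal_Delete_Punctuation : Prop := ∀ (allwords : List String), Dom_Delete_Punctuation allwords → Spec_Delete_Punctuation allwords (Delete_Punctuation allwords)

-- ===== LEMMAS AND PROOFS =====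

-- Char-level tokenizer (pvScanB without the String.ofList wrapping)
def pvScan : List Char → List Char → List (List Char)
  | [], buf => if buf.isEmpty then [] else [buf]
  | c :: rest, buf =>
      if pvDelim c then
        (if buf.isEmpty then pvScan rest [] else buf :: pvScan rest [])
      else pvScan rest (buf ++ [c])

theorem pvScanB_eq (cs buf : List Char) : pvScanB cs buf = (pvScan cs buf).map String.ofList := by
  induction cs generalizing buf with
  | nil => simp only [pvScanB, pvScan]; split <;> simp
  | cons c rest ih => simp only [pvScanB, pvScan]; split_ifs <;> simp [ih]

-- the substituting map that 'word.replace(p, " ")' performs for a single character p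
def pvSub (p c : Char) : Char := if c = p then ' ' else c

theorem replace_go_single (p : Char) (l : List Char) :
    ∀ (fuel : Nat) (acc : List Char), l.length ≤ fuel →
      PySem.Chars.replace.go [p] [' '] fuel l acc = acc.reverse ++ l.map (pvSub p) := by
  induction l with
  | nil =>
      intro fuel acc _
      cases fuel <;> simp [PySem.Chars.replace.go]
  | cons c t ih =>
      intro fuel acc h
      cases fuel with
      | zero => simp at h
      | succ f =>
          have ht : t.length ≤ f := by simp only [List.length_cons] at h; omega
          simp only [PySem.Chars.replace.go, List.isPrefixOf]
          by_cases hc : c = p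
          · subst hc
            simp only [beq_self_eq_true, Bool.and_self, if_true]
            rw [show [' '].reverse ++ acc = ' ' :: acc from rfl,
                show List.drop [c].length (c :: t) = t from rfl,
                ih f (' ' :: acc) ht]
            simp only [List.map_cons, List.reverse_cons,
              List.append_assoc, List.singleton_append]
            congr 2
            simp [pvSub]
          · have hpc : (p == c) = false := beq_eq_false_iff_ne.mpr (Ne.symm hc)
            simp only [hpc, Bool.false_and, Bool.false_eq_true, if_false]
            rw [ih f (c :: acc) ht]
            simp only [List.map_cons, List.reverse_cons, List.append_assoc, List.singleton_append]
            congr 2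
            simp [pvSub, hc]

theorem replace_single (p : Char) (l : List Char) :
    PySem.Chars.replace l [p] [' '] = l.map (pvSub p) := by
  simp only [PySem.Chars.replace, List.isEmpty_cons, Bool.false_eq_true, if_false]
  simpa using replace_go_single p l l.length [] le_rfl

-- a word of delimiters only carries at most the incoming buffer as token
theorem pvScan_delims (ds : List Char) (hd : ∀ c ∈ ds, pvDelim c = true) (buf : List Char) :
    pvScan ds buf = if buf.isEmpty then [] else [buf] := by
  induction ds generalizing buf with
  | nil => rfl
  | cons d ds ih =>
      have hdd : pvDelim d = true := hd d (by simp)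
      have hds : ∀ c ∈ ds, pvDelim c = true := fun c hc => hd c (by simp [hc])
      simp only [pvScan, hdd, if_true, ih hds]
      split_ifs <;> simp_all

-- tokenization ignores trailing delimiters
theorem pvScan_append_delims (ds : List Char) (hd : ∀ c ∈ ds, pvDelim c = true) :
    ∀ (xs buf : List Char), pvScan (xs ++ ds) buf = pvScan xs buf := by
  intro xs
  induction xs with
  | nil =>
      intro buf
      rw [List.nil_append, pvScan_delims ds hd buf]
      rfl
  | cons c rest ih =>
      intro buf
      simp only [List.cons_append, pvScan]
      split_ifs <;> simp [ih]

-- tokenization ignores leading delimiters (from the empty buffer)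
theorem pvScan_dropWhile (q : Char → Bool) (hq : ∀ c, q c = true → pvDelim c = true) (xs : List Char) :
    pvScan (xs.dropWhile q) [] = pvScan xs [] := by
  induction xs with
  | nil => simp
  | cons c rest ih =>
      by_cases h : q c = true
      · rw [List.dropWhile_cons_of_pos h, ih]
        simp [pvScan, hq c h]
      · rw [List.dropWhile_cons_of_neg h]

theorem pvScan_strip (xs : List Char) : pvScan (PySem.Chars.strip xs) [] = pvScan xs [] := by
  have hq : ∀ c, PySem.Chars.isspace c = true → pvDelim c = true := by
    intro c hc; unfold pvDelim; simp [hc]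
  unfold PySem.Chars.strip PySem.Chars.rstrip
  set y := PySem.Chars.lstrip xs with hy
  have hsplit : y = (List.dropWhile PySem.Chars.isspace y.reverse).reverse ++
      (List.takeWhile PySem.Chars.isspace y.reverse).reverse := by
    rw [← List.reverse_append, ← List.takeWhile_append_dropWhile (p := PySem.Chars.isspace) (l := y.reverse)]
    simp
  have hds : ∀ c ∈ (List.takeWhile PySem.Chars.isspace y.reverse).reverse, pvDelim c = true := by
    intro c hc
    rw [List.mem_reverse] at hc
    exact hq c (List.mem_takeWhile_imp hc)
  calc pvScan (List.dropWhile PySem.Chars.isspace y.reverse).reverse []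
      = pvScan ((List.dropWhile PySem.Chars.isspace y.reverse).reverse ++
          (List.takeWhile PySem.Chars.isspace y.reverse).reverse) [] := by
        rw [pvScan_append_delims _ hds]
    _ = pvScan y [] := by rw [← hsplit]
    _ = pvScan xs [] := by rw [hy]; exact pvScan_dropWhile _ hq xs

-- mapping one delimiter character to ' ' does not change the tokens
theorem pvScan_map_sub (p : Char) (hp : pvDelim p = true) :
    ∀ (xs buf : List Char), pvScan (xs.map (pvSub p)) buf = pvScan xs buf := by
  intro xs
  induction xs with
  | nil => intro buf; simp
  | cons c rest ih =>
      intro buf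
      by_cases hc : c = p
      · subst hc
        have hsp : pvDelim ' ' = true := by decide
        simp only [List.map_cons, pvScan, pvSub, hp, hsp, if_true, ih]
      · simp only [List.map_cons, pvSub, if_neg hc, pvScan, ih]

-- the A-side inner loop, on chars
def pvStepA (w : List Char) (p : Char) : List Char :=
  if PySem.Chars.isIn [p] w then PySem.Chars.strip (PySem.Chars.replace w [p] [' ']) else w

theorem mem_strip {c : Char} {xs : List Char} (h : c ∈ PySem.Chars.strip xs) : c ∈ xs := by
  simp only [PySem.Chars.strip, PySem.Chars.rstrip, PySem.Chars.lstrip] at h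
  rw [List.mem_reverse] at h
  have h2 := (List.dropWhile_sublist _).mem h
  rw [List.mem_reverse] at h2
  exact (List.dropWhile_sublist _).mem h2

theorem singleton_infix_iff {c : Char} {xs : List Char} : [c] <:+: xs ↔ c ∈ xs := by
  constructor
  · intro ⟨s, t, h⟩; subst h; simp
  · intro h
    obtain ⟨s, t, h⟩ := List.append_of_mem h
    exact ⟨s, t, by simp [h]⟩

theorem mem_stepA {c : Char} {w : List Char} {p : Char} (h : c ∈ pvStepA w p) : c ∈ w ∨ c = ' ' := by
  unfold pvStepA at h
  split_ifs at h with hin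
  · have h2 := mem_strip h
    rw [replace_single] at h2
    obtain ⟨d, hd, hdc⟩ := List.mem_map.mp h2
    unfold pvSub at hdc
    split_ifs at hdc
    · right; exact hdc.symm
    · left; exact hdc ▸ hd
  · left; exact h

theorem stepA_removes {w : List Char} {p : Char} (hp : p ≠ ' ') : p ∉ pvStepA w p := by
  unfold pvStepA
  split_ifs with hin
  · intro h
    have h2 := mem_strip h
    rw [replace_single] at h2
    obtain ⟨d, _, hdc⟩ := List.mem_map.mp h2
    unfold pvSub at hdc
    split_ifs at hdc with hdp
    · exact hp hdc.symm
    · exact hdp hdc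
  · intro h
    rw [Bool.not_eq_true, PySem.Chars.isIn_eq_false_iff] at hin
    exact hin (singleton_infix_iff.mpr h)

theorem stepA_tokens {w : List Char} {p : Char} (hp : pvDelim p = true) :
    pvScan (pvStepA w p) [] = pvScan w [] := by
  unfold pvStepA
  split_ifs with hin
  · rw [replace_single] at *
    rw [pvScan_strip, pvScan_map_sub p hp]
  · rfl

-- the full A-side loop invariant
theorem foldA_inv (ps : List Char) (hps : ∀ p ∈ ps, pvDelim p = true) :
    ∀ (w : List Char),
      pvScan (ps.foldl pvStepA w) [] = pvScan w [] ∧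
      (∀ c ∈ ps.foldl pvStepA w, c ∈ w ∨ c = ' ') ∧
      (∀ p ∈ ps, p = ' ' ∨ p ∉ ps.foldl pvStepA w) := by
  induction ps with
  | nil => exact fun w => ⟨rfl, fun c hc => Or.inl hc, by simp⟩
  | cons q ps ih =>
      intro w
      have hq : pvDelim q = true := hps q (by simp)
      have hps' : ∀ p ∈ ps, pvDelim p = true := fun p hp => hps p (by simp [hp])
      obtain ⟨ih1, ih2, ih3⟩ := ih hps' (pvStepA w q)
      simp only [List.foldl_cons]
      refine ⟨by rw [ih1, stepA_tokens hq], ?_, ?_⟩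
      · intro c hc
        rcases ih2 c hc with h | h
        · exact mem_stepA h
        · right; exact h
      · intro p hp
        rcases List.mem_cons.mp hp with rfl | hmem
        · by_cases hsp : p = ' '
          · left; exact hsp
          · right
            intro hmem2
            rcases ih2 p hmem2 with h | h
            · exact stepA_removes hsp h
            · exact hsp h
        · exact ih3 p hmem

-- when every character of w that is a delimiter is whitespace, split() gives exactly the tokens
theorem split₀_go_eq_pvScan (l : List Char) (hl : ∀ c ∈ l, pvDelim c = PySem.Chars.isspace c) :
    ∀ (cur : List Char) (acc : List (List Char)),
      PySem.Chars.split₀.go l cur acc = acc.reverse ++ pvScan l cur.reverse := by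
  induction l with
  | nil =>
      intro cur acc
      simp only [PySem.Chars.split₀.go, pvScan]
      split_ifs with h <;> simp_all
  | cons c rest ih =>
      intro cur acc
      have hc := hl c (by simp)
      have hrest : ∀ d ∈ rest, pvDelim d = PySem.Chars.isspace d := fun d hd => hl d (by simp [hd])
      simp only [PySem.Chars.split₀.go, pvScan, ← hc]
      split_ifs with h1 h2 h2 <;> simp_all [ih hrest]

theorem split₀_eq_pvScan (l : List Char) (hl : ∀ c ∈ l, pvDelim c = PySem.Chars.isspace c) :
    PySem.Chars.split₀ l = pvScan l [] := by
  simpa using split₀_go_eq_pvScan l hl [] []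

-- the per-word equality: A's processed word splits into exactly B's tokens
theorem perword (w : List Char) :
    (if 0 < (pvPunct.toList.foldl pvStepA w).length then
      PySem.Chars.split₀ (pvPunct.toList.foldl pvStepA w) else []) = pvScan w [] := by
  have hps : ∀ p ∈ pvPunct.toList, pvDelim p = true := by
    intro p hp; unfold pvDelim; simp [List.contains_eq_mem, hp]
  obtain ⟨h1, _, h3⟩ := foldA_inv pvPunct.toList hps w
  set w' := pvPunct.toList.foldl pvStepA w with hw'
  have hws : ∀ c ∈ w', pvDelim c = PySem.Chars.isspace c := by
    intro c hc
    by_cases hcp : c ∈ pvPunct.toList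
    · rcases h3 c hcp with rfl | habs
      · decide
      · exact absurd hc habs
    · unfold pvDelim
      simp [List.contains_eq_mem, hcp]
  by_cases hlen : 0 < w'.length
  · rw [if_pos hlen, split₀_eq_pvScan w' hws, h1]
  · have hnil : w' = [] := by
      cases hcs : w' with
      | nil => rfl
      | cons a b => rw [hcs] at hlen; simp at hlen
    rw [if_neg hlen, ← h1, hnil]
    rfl

-- bridge A's String-level inner loop to the Char-level loop
theorem foldA_toList (ps : List Char) (w : String) :
    (ps.foldl (fun w punc =>
      if PySem.Str.isIn (String.ofList [punc]) w then
        PySem.Str.strip (PySem.Str.replace w (String.ofList [punc]) " ")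
      else w) w).toList = ps.foldl pvStepA w.toList := by
  induction ps generalizing w with
  | nil => rfl
  | cons p ps ih =>
      simp only [List.foldl_cons, ih]
      congr 1
      simp only [PySem.Str.isIn, PySem.Str.strip, PySem.Str.replace, pvStepA]
      split_ifs with h1 h2 <;> simp_all

theorem body_eq (acc : List String) (word : String) :
    (if PySem.Str.len (pvPunct.toList.foldl (fun w punc =>
        if PySem.Str.isIn (String.ofList [punc]) w then
          PySem.Str.strip (PySem.Str.replace w (String.ofList [punc]) " ")
        else w) word) > 0 then
      acc ++ PySem.Str.split₀ (pvPunct.toList.foldl (fun w punc =>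
        if PySem.Str.isIn (String.ofList [punc]) w then
          PySem.Str.strip (PySem.Str.replace w (String.ofList [punc]) " ")
        else w) word)
    else acc) = acc ++ pvScanB word.toList [] := by
  rw [pvScanB_eq]
  have hpw := perword word.toList
  simp only [PySem.Str.len, PySem.Str.split₀, foldA_toList, gt_iff_lt]
  by_cases hlen : 0 < (pvPunct.toList.foldl pvStepA word.toList).length
  · rw [if_pos hlen] at hpw
    rw [if_pos (Int.natCast_pos.mpr hlen), hpw]
  · rw [if_neg hlen] at hpw
    rw [if_neg (fun hh => hlen (Int.natCast_pos.mp hh)), ← hpw]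
    simp

theorem folds_eq (l : List String) : ∀ (acc : List String),
    l.foldl (fun acc word =>
      let word := pvPunct.toList.foldl (fun w punc =>
        if PySem.Str.isIn (String.ofList [punc]) w then
          PySem.Str.strip (PySem.Str.replace w (String.ofList [punc]) " ")
        else w) word
      let words := PySem.Str.split₀ word
      if PySem.Str.len word > 0 then acc ++ words else acc) acc
    = l.foldl (fun acc word => acc ++ pvScanB word.toList []) acc := by
  induction l with
  | nil => intro acc; rw [List.foldl_nil, List.foldl_nil]
  | cons word l ih =>
      intro acc
      rw [List.foldl_cons, List.foldl_cons]
      show l.foldl _ (if PySem.Str.len _ > 0 then acc ++ PySem.Str.split₀ _ else acc) = _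
      rw [body_eq acc word, ih]

-- ===== VERDICT (by name: the statement is the Claim_ definition above) =====
set_option maxRecDepth 16384 in
theorem Delete_Punctuation_spec : Claim_equal_Delete_Punctuation := by
  unfold Claim_equal_Delete_Punctuation
  intro allwords _
  unfold Spec_Delete_Punctuation Delete_Punctuation Delete_Punctuation_alt
  exact folds_eq allwords []
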